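-- pv_equiv track=rewrite | github.com/Mohamed-Akram-Hl/work | Devoir 6/dev6.py | hereux
-- ===== SOURCE A (Python) =====
-- def power2(a):
--     return a*a
--
-- def hereux(n):
--     n = str(power2(int(n)))
--     p =0
--     while len(n)!= 1:
--         p=0
--         for i in range(len(n)):
--             p = p + power2(int(n[i]))
--         n = str(p)
--     return n == "1"
-- ===== SOURCE B (Python) =====
-- # Table-driven variant: digit squares are summed two digits at a time via a
-- # precomputed base-100 table, the loop only runs while v >= 100 (where the map
-- # strictly decreases), and the finite tail behaviour on 0..99 is a table lookup.
--
-- # SQSUM[r] = sum of squares of the (at most two) decimal digits of r, 0 <= r < 100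
-- SQSUM = [(r % 10) ** 2 + (r // 10) ** 2 for r in range(100)]
--
-- # TABLE[v] = first single digit reached from v by iterating digit-square sums, 0 <= v < 100
-- TABLE = [0, 1, 2, 3, 4, 5, 6, 7, 8, 9, 1, 2, 5, 1, 4, 4, 4, 4, 4, 1,
--          4, 5, 8, 1, 4, 4, 4, 4, 1, 4, 9, 1, 1, 4, 4, 4, 4, 4, 4, 4,
--          4, 4, 4, 4, 1, 4, 4, 4, 4, 1, 4, 4, 4, 4, 4, 4, 4, 4, 4, 4,
--          4, 4, 4, 4, 4, 4, 4, 4, 1, 4, 1, 4, 4, 4, 4, 4, 4, 4, 2, 1,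
--          4, 4, 1, 4, 4, 4, 1, 2, 4, 4, 4, 1, 4, 4, 1, 4, 4, 1, 4, 4]
--
-- def hereux(n):
--     v = int(n) ** 2
--     while v >= 100:
--         s = 0
--         while v:
--             v, r = divmod(v, 100)
--             s += SQSUM[r]
--         v = s
--     return TABLE[v] == 1
-- ===== Notes on version B (the rewrite author's own statement) =====
-- stated objective: alternative
-- what changed: B replaces A's per-digit string re-parsing loop by a table-driven scheme: digit squares are summed two digits at a time through a precomputed base-hundred square-sum table, the loop only runs while the value still has three or more digits (where one pass strictly decreases it), and the entire finite tail behaviour on smaller values (where the chain can oscillate) is replaced by a precomputed outcome-table lookup.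
import Mathlib
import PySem

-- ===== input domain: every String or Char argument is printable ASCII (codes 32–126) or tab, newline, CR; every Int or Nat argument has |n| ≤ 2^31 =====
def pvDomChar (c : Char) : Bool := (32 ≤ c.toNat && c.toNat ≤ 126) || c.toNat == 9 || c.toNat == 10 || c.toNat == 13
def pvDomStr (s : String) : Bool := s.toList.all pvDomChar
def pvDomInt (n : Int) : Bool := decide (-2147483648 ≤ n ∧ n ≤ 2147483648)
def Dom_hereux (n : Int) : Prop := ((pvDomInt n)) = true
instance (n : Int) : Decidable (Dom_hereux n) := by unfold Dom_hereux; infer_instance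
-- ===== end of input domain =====

-- B is table-driven: digit squares are summed two digits at a time via a precomputed base-100 table,
-- the loop only runs while the value still has three or more digits (one pass strictly decreases it),
-- and the finite tail
-- behaviour on 0..99 is a second precomputed 100-entry outcome table (alternative, same asymptotics).
-- The loop ports carry fuel counters purely as totality guards (far more than any admitted input needs).

-- ===== PORT A =====
def power2 (a : Int) : Int := a * a

-- the inner 'for i in range(len(n)): p = p + power2(int(n[i]))' with p starting at 0
-- (int(n[i]) via pyGet?/ofChars?; the .getD defaults are never hit: i ranges over valid indices of a digit string)
def hereuxStep (s : String) : Int :=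
  (PySem.List.pyRange 0 (PySem.Str.len s) 1).foldl
    (fun p i => p + power2 ((PySem.Int.ofChars? [(PySem.Str.pyGet? s i).getD ' ']).getD 0)) 0

-- the 'while len(n) != 1' loop (fuel = totality guard only)
def hereuxLoop : Nat → String → String
  | 0, s => s
  | f+1, s =>
    if PySem.Str.len s ≠ 1 then hereuxLoop f (PySem.Int.toStr (hereuxStep s)) else s

def hereux (n : Int) : Bool :=
  hereuxLoop 2000 (PySem.Int.toStr (power2 n)) == "1"

-- ===== PORT B =====
-- SQSUM[r] = sum of squares of the (at most two) decimal digits of r, 0 <= r < 100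
def SQSUM : List Int :=
  [0, 1, 4, 9, 16, 25, 36, 49, 64, 81, 1, 2, 5, 10, 17, 26, 37, 50, 65, 82,
   4, 5, 8, 13, 20, 29, 40, 53, 68, 85, 9, 10, 13, 18, 25, 34, 45, 58, 73, 90,
   16, 17, 20, 25, 32, 41, 52, 65, 80, 97, 25, 26, 29, 34, 41, 50, 61, 74, 89, 106,
   36, 37, 40, 45, 52, 61, 72, 85, 100, 117, 49, 50, 53, 58, 65, 74, 85, 98, 113, 130,
   64, 65, 68, 73, 80, 89, 100, 113, 128, 145, 81, 82, 85, 90, 97, 106, 117, 130, 145, 162]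

-- TABLE[v] = first single digit reached from v by iterating digit-square sums, 0 <= v < 100
def TABLE : List Int :=
  [0, 1, 2, 3, 4, 5, 6, 7, 8, 9, 1, 2, 5, 1, 4, 4, 4, 4, 4, 1,
   4, 5, 8, 1, 4, 4, 4, 4, 1, 4, 9, 1, 1, 4, 4, 4, 4, 4, 4, 4,
   4, 4, 4, 4, 1, 4, 4, 4, 4, 1, 4, 4, 4, 4, 4, 4, 4, 4, 4, 4,
   4, 4, 4, 4, 4, 4, 4, 4, 1, 4, 1, 4, 4, 4, 4, 4, 4, 4, 2, 1,
   4, 4, 1, 4, 4, 4, 1, 2, 4, 4, 4, 1, 4, 4, 1, 4, 4, 1, 4, 4]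

-- the inner 'while v: v, r = divmod(v, 100); s += SQSUM[r]' (fuel = totality guard only)
def sqChunksF : Nat → Int → Int → Int
  | 0, _, s => s
  | f+1, v, s =>
    if v ≠ 0 then
      sqChunksF f (PySem.Int.floordiv v 100)
        (s + (PySem.List.pyGet? SQSUM (PySem.Int.mod v 100)).getD 0)
    else s

-- the 'while v >= 100' loop (fuel = totality guard only)
def bLoop : Nat → Int → Int
  | 0, v => v
  | f+1, v => if 100 ≤ v then bLoop f (sqChunksF 50 v 0) else v

def hereux_alt (n : Int) : Bool :=
  (PySem.List.pyGet? TABLE (bLoop 1950 (n ^ 2))).getD 0 == 1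

-- ===== PRECONDITION & SPEC =====
def Spec_hereux (n : Int) (out : Bool) : Prop := out = hereux_alt n
instance (n : Int) (out : Bool) : Decidable (Spec_hereux n out) := by unfold Spec_hereux; infer_instance

-- ===== CLAIM (what is proved, stated in full; the proofs are below) =====
def Claim_equal_hereux : Prop := ∀ (n : Int), Dom_hereux n → Spec_hereux n (hereux n)

-- ===== LEMMAS AND PROOFS =====

-- abbreviations used only by the proofs
def chVal (c : Char) : Int := (PySem.Int.ofChars? [c]).getD 0
def chSq (c : Char) : Int := chVal c * chVal c

-- sum of squares of the decimal digits, via Nat.toDigits (proof vehicle)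
def S (m : Nat) : Int := ((Nat.toDigits 10 m).map chSq).sum

-- reference integer digit-square sum (well-founded; proof vehicle)
def sqDigitsGo (v acc : Int) : Int :=
  if _h : 0 < v then
    sqDigitsGo (PySem.Int.floordiv v 10)
      (acc + PySem.Int.mod v 10 * PySem.Int.mod v 10)
  else acc
termination_by v.toNat
decreasing_by
  have h10 : PySem.Int.floordiv v 10 = v / 10 := by
    simp [PySem.Int.floordiv, Int.fdiv_eq_ediv]
  rw [h10]; omega

-- fuel-structural twin of sqDigitsGo (so that 'decide' can evaluate the A-side loop)
def sqDigitsF : Nat → Int → Int → Int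
  | 0, _, acc => acc
  | f+1, v, acc =>
    if 0 < v then
      sqDigitsF f (PySem.Int.floordiv v 10)
        (acc + PySem.Int.mod v 10 * PySem.Int.mod v 10)
    else acc

-- fuel-structural integer mirror of A's outer loop (proof vehicle)
def aIntLoop : Nat → Int → Int
  | 0, v => v
  | f+1, v => if 10 ≤ v then aIntLoop f (sqDigitsF 100 v 0) else v

-- TABLE lookup as the B port performs it
def tbl (v : Int) : Int := (PySem.List.pyGet? TABLE v).getD 0

theorem toDigitsCore_succ (f n : Nat) (acc : List Char) :
    Nat.toDigitsCore 10 (f + 1) n acc =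
      if n / 10 = 0 then (n % 10).digitChar :: acc
      else Nat.toDigitsCore 10 f (n / 10) ((n % 10).digitChar :: acc) := by
  simp [Nat.toDigitsCore]

-- toDigitsCore: the accumulator is just appended
theorem toDigitsCore_acc (f : Nat) : ∀ (n : Nat) (acc : List Char),
    Nat.toDigitsCore 10 f n acc = Nat.toDigitsCore 10 f n [] ++ acc := by
  induction f with
  | zero => intro n acc; simp [Nat.toDigitsCore]
  | succ f ih =>
    intro n acc
    simp only [Nat.toDigitsCore]
    by_cases h : n / 10 = 0
    · simp [h]
    · simp only [h, if_false]
      rw [ih (n / 10) ((n % 10).digitChar :: acc), ih (n / 10) [(n % 10).digitChar]]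
      simp

-- toDigitsCore: any sufficient fuel gives the same digits
theorem toDigitsCore_fuel (f : Nat) : ∀ (f' n : Nat), n < f → n < f' →
    Nat.toDigitsCore 10 f n [] = Nat.toDigitsCore 10 f' n [] := by
  induction f with
  | zero => intro f' n h; omega
  | succ f ih =>
    intro f' n h h'
    cases f' with
    | zero => omega
    | succ f' =>
      simp only [Nat.toDigitsCore]
      by_cases h0 : n / 10 = 0
      · simp [h0]
      · simp only [h0, if_false]
        rw [toDigitsCore_acc f, toDigitsCore_acc f']
        have hn : 0 < n := by
          rcases Nat.eq_zero_or_pos n with h1 | h1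
          · exact absurd (by simp [h1]) h0
          · exact h1
        have hlt : n / 10 < n := Nat.div_lt_self hn (by omega)
        rw [ih f' (n / 10) (by omega) (by omega)]

-- the recursion toDigits satisfies
theorem toDigits_rec (m : Nat) :
    Nat.toDigits 10 m =
      if m < 10 then [Nat.digitChar m]
      else Nat.toDigits 10 (m / 10) ++ [Nat.digitChar (m % 10)] := by
  by_cases h : m < 10
  · have h0 : m / 10 = 0 := Nat.div_eq_of_lt h
    simp [Nat.toDigits, Nat.toDigitsCore, h0, h, Nat.mod_eq_of_lt h]
  · have h0 : m / 10 ≠ 0 := by omega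
    rw [if_neg h, Nat.toDigits, Nat.toDigits, toDigitsCore_succ, if_neg h0]
    rw [toDigitsCore_acc m, toDigitsCore_fuel m (m / 10 + 1) (m / 10)
      (Nat.lt_of_lt_of_le (Nat.div_lt_self (by omega) (by omega)) (by omega)) (by omega)]

theorem toDigits_ne_nil (m : Nat) : Nat.toDigits 10 m ≠ [] := by
  rw [toDigits_rec]; split <;> simp

theorem toDigits_len_one_iff (m : Nat) : (Nat.toDigits 10 m).length = 1 ↔ m < 10 := by
  constructor
  · intro h
    by_contra hge
    rw [toDigits_rec] at h
    simp only [hge, if_false, List.length_append, List.length_singleton] at h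
    exact toDigits_ne_nil (m / 10) (List.length_eq_zero_iff.mp (by omega))
  · intro h; rw [toDigits_rec]; simp [h]

theorem chVal_digitChar (d : Nat) (h : d < 10) : chVal (Nat.digitChar d) = (d : Int) := by
  interval_cases d <;> decide

-- S satisfies the digit recursion
theorem S_rec (m : Nat) :
    S m = if m < 10 then (m : Int) * m else S (m / 10) + ((m % 10 : Nat) : Int) * ((m % 10 : Nat) : Int) := by
  by_cases h : m < 10
  · rw [if_pos h, S, toDigits_rec, if_pos h]
    simp [chSq, chVal_digitChar m h]
  · rw [if_neg h, S, S, toDigits_rec m, if_neg h]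
    simp [chSq, chVal_digitChar (m % 10) (Nat.mod_lt m (by omega))]

theorem S_nonneg (m : Nat) : 0 ≤ S m := by
  apply List.sum_nonneg
  intro x hx
  simp only [List.mem_map] at hx
  obtain ⟨c, _, rfl⟩ := hx
  exact mul_self_nonneg _

-- the reference integer loop computes acc + S
theorem sqDigitsGo_S (m : Nat) : ∀ (acc : Int),
    sqDigitsGo (m : Int) acc = acc + S m := by
  induction m using Nat.strong_induction_on with
  | _ m ih =>
    intro acc
    by_cases hm : 0 < m
    · have hpos : (0 : Int) < (m : Int) := by exact_mod_cast hm
      rw [sqDigitsGo, dif_pos hpos]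
      have hfd : PySem.Int.floordiv (m : Int) 10 = ((m / 10 : Nat) : Int) := by
        simp [PySem.Int.floordiv, Int.fdiv_eq_ediv]
      have hmd : PySem.Int.mod (m : Int) 10 = ((m % 10 : Nat) : Int) := by
        simp [PySem.Int.mod, Int.fmod_eq_emod]
      rw [hfd, hmd, ih (m / 10) (Nat.div_lt_self hm (by omega))]
      rw [S_rec m]
      by_cases h10 : m < 10
      · have h0 : m / 10 = 0 := Nat.div_eq_of_lt h10
        have hm0 : m % 10 = m := Nat.mod_eq_of_lt h10
        have hS0 : S 0 = 0 := by rw [S]; decide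
        simp only [h10, if_true, h0, hm0, hS0]
        ring
      · simp only [h10, if_false]
        ring
    · have hm0 : m = 0 := by omega
      subst hm0
      rw [sqDigitsGo]
      have hS0 : S 0 = 0 := by rw [S]; decide
      simp [hS0]

theorem sqDigitsGo_nat (v : Int) (hv : 0 ≤ v) : sqDigitsGo v 0 = S v.toNat := by
  have hc : v = ((v.toNat : Nat) : Int) := by omega
  conv_lhs => rw [hc]
  rw [sqDigitsGo_S v.toNat 0, zero_add]

-- generic fold-to-sum
theorem foldl_add_sq (cs : List Char) : ∀ (a : Int),
    cs.foldl (fun p c => p + chSq c) a = a + (cs.map chSq).sum := by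
  induction cs with
  | nil => intro a; simp
  | cons c cs ih => intro a; simp [ih]; ring

-- toChars of a nonnegative value
theorem toChars_nonneg (v : Int) (hv : 0 ≤ v) :
    PySem.Int.toChars v = Nat.toDigits 10 v.toNat := by
  simp [PySem.Int.toChars, not_lt.mpr hv]

-- A's inner for-loop equals the reference digit-square sum
theorem hereuxStep_eq (v : Int) (hv : 0 ≤ v) :
    hereuxStep (PySem.Int.toStr v) = sqDigitsGo v 0 := by
  have hlist : (PySem.Int.toStr v).toList = Nat.toDigits 10 v.toNat := by
    rw [PySem.Int.toList_toStr, toChars_nonneg v hv]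
  rw [hereuxStep]
  have hbody : (fun (p : Int) (i : Int) =>
      p + power2 ((PySem.Int.ofChars? [(PySem.Str.pyGet? (PySem.Int.toStr v) i).getD ' ']).getD 0))
      = fun (p : Int) (i : Int) =>
        (fun (q : Int) (c : Char) => q + chSq c)
          p (PySem.List.pyGetD (PySem.Int.toStr v).toList i ' ') := by
    funext p i
    simp [PySem.Str.pyGet?, PySem.List.pyGetD, power2, chSq, chVal,
      PySem.Chars.pyGet?_eq_listPyGet?]
  have hlen : PySem.Str.len (PySem.Int.toStr v) = PySem.List.len (PySem.Int.toStr v).toList := by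
    simp [PySem.Str.len, PySem.List.len]
  rw [hbody, hlen]
  rw [show (PySem.List.pyRange 0 (PySem.List.len (PySem.Int.toStr v).toList) 1)
        = (PySem.List.pyRange 0 (PySem.List.len (PySem.Int.toStr v).toList)) from rfl]
  rw [PySem.List.foldl_pyRange_zero_pyGetD (PySem.Int.toStr v).toList ' '
    (fun (q : Int) (c : Char) => q + chSq c) 0]
  rw [foldl_add_sq, hlist, sqDigitsGo_nat v hv]
  rw [S]; ring

theorem digitChar_eq_one (d : Nat) (hd : d < 10) : Nat.digitChar d = '1' → d = 1 := by
  interval_cases d <;> decide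

-- final comparison: str(v) == "1" iff v == 1, for v ≥ 0
theorem toStr_beq_one (v : Int) (hv : 0 ≤ v) :
    (PySem.Int.toStr v == "1") = (v == 1) := by
  have hlist : (PySem.Int.toStr v).toList = Nat.toDigits 10 v.toNat := by
    rw [PySem.Int.toList_toStr, toChars_nonneg v hv]
  by_cases h1 : v = 1
  · subst h1; decide
  · have hne : Nat.toDigits 10 v.toNat ≠ ['1'] := by
      intro hd
      by_cases h10 : v.toNat < 10
      · rw [toDigits_rec, if_pos h10] at hd
        have hdc : Nat.digitChar v.toNat = '1' := by
          injection hd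
        have := digitChar_eq_one v.toNat h10 hdc
        omega
      · have hlen1 : (Nat.toDigits 10 v.toNat).length = 1 := by rw [hd]; rfl
        exact h10 ((toDigits_len_one_iff v.toNat).mp hlen1)
    have hs : PySem.Int.toStr v ≠ "1" := by
      intro hstr
      apply hne
      rw [← hlist, hstr]
      rfl
    simp [hs, h1]

-- A's loop condition: len(str(v)) != 1 iff 10 ≤ v, for v ≥ 0
theorem len_toStr_ne_one (v : Int) (hv : 0 ≤ v) :
    (PySem.Str.len (PySem.Int.toStr v) ≠ 1) ↔ (10 ≤ v) := by
  have hlist : (PySem.Int.toStr v).toList = Nat.toDigits 10 v.toNat := by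
    rw [PySem.Int.toList_toStr, toChars_nonneg v hv]
  rw [PySem.Str.len, hlist]
  rw [show ((Nat.toDigits 10 v.toNat).length : Int) ≠ 1
        ↔ (Nat.toDigits 10 v.toNat).length ≠ 1 by exact_mod_cast Iff.rfl]
  rw [Ne, toDigits_len_one_iff]
  omega

-- digit-square sums are bounded by 81 per digit
theorem S_bound (d : Nat) : ∀ (m : Nat), m < 10 ^ d → S m ≤ 81 * d := by
  induction d with
  | zero =>
    intro m hm
    interval_cases m
    rw [S]; decide
  | succ d ih =>
    intro m hm
    rw [S_rec]
    by_cases h : m < 10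
    · rw [if_pos h]
      have : (m : Int) ≤ 9 := by exact_mod_cast Nat.lt_succ_iff.mp h
      have h0 : (0 : Int) ≤ (m : Int) := by positivity
      push_cast
      nlinarith
    · rw [if_neg h]
      have hd : m / 10 < 10 ^ d := by
        rw [Nat.div_lt_iff_lt_mul (by omega)]
        calc m < 10 ^ (d + 1) := hm
        _ = 10 ^ d * 10 := by ring
      have h1 := ih (m / 10) hd
      have h2 : ((m % 10 : Nat) : Int) ≤ 9 := by exact_mod_cast Nat.lt_succ_iff.mp (Nat.mod_lt m (by omega))
      have h3 : (0 : Int) ≤ ((m % 10 : Nat) : Int) := by positivity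
      have hc : ((d + 1 : Nat) : Int) = (d : Int) + 1 := by push_cast; ring
      rw [hc]
      nlinarith

-- strict descent for v ≥ 100
theorem S_lt (m : Nat) (hm : 100 ≤ m) : S m < (m : Int) := by
  induction m using Nat.strong_induction_on with
  | _ m ih =>
    by_cases h : m < 1000
    · -- 3-digit base case: S m = a² + b² + c²
      have h10 : ¬ m < 10 := by omega
      have h10' : ¬ m / 10 < 10 := by omega
      have h100 : m / 10 / 10 < 10 := by omega
      rw [S_rec m, if_neg h10, S_rec (m / 10), if_neg h10', S_rec (m / 10 / 10), if_pos h100]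
      set a : Nat := m / 10 / 10
      set b : Nat := m / 10 % 10
      set c : Nat := m % 10
      have hm' : m = 100 * a + 10 * b + c := by omega
      have ha1 : 1 ≤ a := by omega
      have ha9 : a ≤ 9 := by omega
      have hb9 : b ≤ 9 := by omega
      have hc9 : c ≤ 9 := by omega
      have ha1' : (1 : Int) ≤ a := by exact_mod_cast ha1
      have ha9' : (a : Int) ≤ 9 := by exact_mod_cast ha9
      have hb9' : (b : Int) ≤ 9 := by exact_mod_cast hb9
      have hc9' : (c : Int) ≤ 9 := by exact_mod_cast hc9
      have hb0 : (0 : Int) ≤ b := by positivity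
      have hc0 : (0 : Int) ≤ c := by positivity
      have hmc : (m : Int) = 100 * a + 10 * b + c := by exact_mod_cast congrArg (Nat.cast : Nat → Int) hm'
      rw [hmc]
      nlinarith [mul_nonneg (by linarith : (0:Int) ≤ 9 - (a:Int)) (by linarith : (0:Int) ≤ (a:Int)),
                 mul_nonneg (by linarith : (0:Int) ≤ 9 - (b:Int)) hb0,
                 mul_nonneg (by linarith : (0:Int) ≤ 9 - (c:Int)) hc0]
    · -- m ≥ 1000: S m = S (m/10) + (m%10)² < m/10 + 81 ≤ m
      have h10 : ¬ m < 10 := by omega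
      rw [S_rec m, if_neg h10]
      have hih := ih (m / 10) (Nat.div_lt_self (by omega) (by omega)) (by omega)
      have h2 : ((m % 10 : Nat) : Int) ≤ 9 := by exact_mod_cast Nat.lt_succ_iff.mp (Nat.mod_lt m (by omega))
      have h3 : (0 : Int) ≤ ((m % 10 : Nat) : Int) := by positivity
      have h4 : ((m / 10 : Nat) : Int) + 81 ≤ (m : Int) := by
        have : m / 10 + 81 ≤ m := by omega
        exact_mod_cast this
      nlinarith

-- the fuel twin agrees with the reference when fuel covers the digits
theorem sqDigitsF_eq (f : Nat) : ∀ (v acc : Int), 0 ≤ v → v < 10 ^ f →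
    sqDigitsF f v acc = sqDigitsGo v acc := by
  induction f with
  | zero =>
    intro v acc h0 h1
    have : v = 0 := by omega
    subst this
    rw [sqDigitsF, sqDigitsGo]
    simp
  | succ f ih =>
    intro v acc h0 h1
    by_cases hv : 0 < v
    · rw [sqDigitsF, if_pos hv, sqDigitsGo, dif_pos hv]
      have hfd : PySem.Int.floordiv v 10 = v / 10 :=
        PySem.Int.floordiv_eq_ediv_of_pos (by omega)
      have hb : PySem.Int.floordiv v 10 < 10 ^ f := by
        rw [hfd, Int.ediv_lt_iff_lt_mul (by omega)]
        calc v < 10 ^ (f + 1) := h1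
        _ = 10 ^ f * 10 := by ring
      have hb0 : 0 ≤ PySem.Int.floordiv v 10 := by rw [hfd]; positivity
      exact ih _ _ hb0 hb
    · have : v = 0 := by omega
      subst this
      rw [sqDigitsF, sqDigitsGo]
      simp
  
-- SQSUM is the two-digit square sum (finite check)
set_option maxRecDepth 100000 in
theorem sqsum_spec : ∀ (k : Nat), k < 100 →
    (PySem.List.pyGet? SQSUM (k : Int)).getD 0
      = ((k % 10 : Nat) : Int) * ((k % 10 : Nat) : Int)
        + ((k / 10 : Nat) : Int) * ((k / 10 : Nat) : Int) := by
  decide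

-- B's chunked inner loop agrees with the reference when fuel covers the chunks
theorem sqChunksF_eq (f : Nat) : ∀ (v acc : Int), 0 ≤ v → v < 100 ^ f →
    sqChunksF f v acc = sqDigitsGo v acc := by
  induction f with
  | zero =>
    intro v acc h0 h1
    have : v = 0 := by omega
    subst this
    rw [sqChunksF, sqDigitsGo]
    simp
  | succ f ih =>
    intro v acc h0 h1
    by_cases hv : 0 < v
    · rw [sqChunksF, if_pos (by omega : v ≠ 0)]
      have hfd : PySem.Int.floordiv v 100 = v / 100 :=
        PySem.Int.floordiv_eq_ediv_of_pos (by omega)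
      have hmd : PySem.Int.mod v 100 = v % 100 :=
        PySem.Int.mod_eq_emod_of_pos (by omega)
      -- the SQSUM entry
      have hrk : (v % 100).toNat < 100 := by omega
      have hr : PySem.Int.mod v 100 = (((v % 100).toNat : Nat) : Int) := by omega
      have hsq : (PySem.List.pyGet? SQSUM (PySem.Int.mod v 100)).getD 0
          = (v % 10) * (v % 10) + (v / 10 % 10) * (v / 10 % 10) := by
        rw [hr, sqsum_spec _ hrk]
        have e1 : (((v % 100).toNat % 10 : Nat) : Int) = v % 10 := by omega
        have e2 : (((v % 100).toNat / 10 : Nat) : Int) = v / 10 % 10 := by omega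
        rw [e1, e2]
      rw [hsq, hfd]
      -- unfold the reference twice
      rw [sqDigitsGo, dif_pos hv]
      have hfd1 : PySem.Int.floordiv v 10 = v / 10 :=
        PySem.Int.floordiv_eq_ediv_of_pos (by omega)
      have hmd1 : PySem.Int.mod v 10 = v % 10 :=
        PySem.Int.mod_eq_emod_of_pos (by omega)
      rw [hfd1, hmd1]
      by_cases h10 : 0 < v / 10
      · rw [sqDigitsGo, dif_pos h10]
        have hfd2 : PySem.Int.floordiv (v / 10) 10 = v / 10 / 10 :=
          PySem.Int.floordiv_eq_ediv_of_pos (by omega)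
        have hmd2 : PySem.Int.mod (v / 10) 10 = v / 10 % 10 :=
          PySem.Int.mod_eq_emod_of_pos (by omega)
        rw [hfd2, hmd2]
        have hdd : v / 10 / 10 = v / 100 := by omega
        rw [hdd]
        have hb : v / 100 < 100 ^ f := by
          rw [Int.ediv_lt_iff_lt_mul (by omega)]
          calc v < 100 ^ (f + 1) := h1
          _ = 100 ^ f * 100 := by ring
        rw [ih (v / 100) _ (by omega) hb]
        ring_nf
      · -- v < 10: v/10 = 0, reference stops; chunk side recurses on 0
        have hv10 : v / 10 = 0 := by omega
        have hv100 : v / 100 = 0 := by omega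
        rw [hv10, hv100]
        rw [show sqDigitsGo 0 (acc + v % 10 * (v % 10)) = acc + v % 10 * (v % 10) by
          rw [sqDigitsGo]; simp]
        have hstop : ∀ (g : Nat) (a : Int), sqChunksF g 0 a = a := by
          intro g a; cases g <;> simp [sqChunksF]
        rw [hstop]
        have : v % 10 = v := by omega
        rw [this]
        ring_nf
    · have : v = 0 := by omega
      subst this
      rw [sqChunksF, sqDigitsGo]
      simp
  
-- the outcome table is correct on 0..99 (finite check on the fuel-structural loop)
set_option maxRecDepth 100000 in
theorem table_check :
    ((List.range 100).all fun k =>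
      decide (aIntLoop 50 (k : Int) < 10) && (aIntLoop 50 (k : Int) == tbl (k : Int))) = true := by
  decide

theorem table_spec (v : Int) (h0 : 0 ≤ v) (h1 : v < 100) :
    aIntLoop 50 v < 10 ∧ aIntLoop 50 v = tbl v := by
  have hk : v = ((v.toNat : Nat) : Int) := by omega
  have hmem : v.toNat ∈ List.range 100 := by
    rw [List.mem_range]; omega
  have := List.all_eq_true.mp table_check _ hmem
  simp only [Bool.and_eq_true, decide_eq_true_eq, beq_iff_eq] at this
  rw [hk]
  exact this

-- table entries are nonnegative (finite check)
set_option maxRecDepth 100000 in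
theorem table_nonneg : ∀ (k : Nat), k < 100 → 0 ≤ (PySem.List.pyGet? TABLE (k : Int)).getD 0 := by
  decide

-- once A's loop has stopped, extra fuel changes nothing
theorem aIntLoop_stable (f : Nat) : ∀ (g : Nat) (v : Int),
    aIntLoop f v < 10 → aIntLoop (f + g) v = aIntLoop f v := by
  induction f with
  | zero =>
    intro g v h
    rw [aIntLoop] at h
    cases g with
    | zero => rfl
    | succ g =>
      rw [Nat.zero_add]
      conv_lhs => rw [aIntLoop]
      rw [if_neg (by omega : ¬ (10 : Int) ≤ v)]
      rfl
  | succ f ih =>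
    intro g v h
    have hh := h
    rw [aIntLoop] at hh
    rw [show f + 1 + g = (f + g) + 1 by omega]
    conv_lhs => rw [aIntLoop]
    conv_rhs => rw [aIntLoop]
    by_cases hv : 10 ≤ v
    · rw [if_pos hv, if_pos hv]
      rw [if_pos hv] at hh
      exact ih g _ hh
    · rw [if_neg hv, if_neg hv]

-- main lemma: B's truncated loop plus the table equals A's full loop
theorem main_lemma (f : Nat) : ∀ (v : Int), 0 ≤ v → v < 10 ^ 100 → v < 100 + f →
    aIntLoop (f + 50) v = tbl (bLoop f v) ∧ aIntLoop (f + 50) v < 10 ∧ 0 ≤ aIntLoop (f + 50) v := by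
  induction f with
  | zero =>
    intro v h0 _ h2
    have ht := table_spec v h0 (by omega)
    rw [show bLoop 0 v = v from rfl, Nat.zero_add]
    refine ⟨ht.2, ht.1, ?_⟩
    rw [ht.2, tbl]
    have hk : v = ((v.toNat : Nat) : Int) := by omega
    rw [hk]
    exact table_nonneg v.toNat (by omega)
  | succ f ih =>
    intro v h0 h1 h2
    by_cases hv : 100 ≤ v
    · -- both loops take a step to s = sqDigitsGo v 0
      have hs : sqDigitsF 100 v 0 = sqDigitsGo v 0 := sqDigitsF_eq 100 v 0 h0 h1
      have hc : sqChunksF 50 v 0 = sqDigitsGo v 0 :=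
        sqChunksF_eq 50 v 0 h0 (by
          have : (100 : Int) ^ 50 = 10 ^ 100 := by norm_num
          rw [this]; exact h1)
      have hS : sqDigitsGo v 0 = S v.toNat := sqDigitsGo_nat v h0
      have hs0 : 0 ≤ sqDigitsGo v 0 := by rw [hS]; exact S_nonneg _
      have hslt : sqDigitsGo v 0 < v := by
        rw [hS]
        have := S_lt v.toNat (by omega)
        omega
      have hsB : sqDigitsGo v 0 < 10 ^ 100 := by
        have hb : S v.toNat ≤ 81 * 100 := S_bound 100 v.toNat (by omega)
        rw [hS]
        calc S v.toNat ≤ 81 * 100 := hb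
        _ < 10 ^ 100 := by norm_num
      rw [show f + 1 + 50 = (f + 50) + 1 by omega, aIntLoop, if_pos (by omega : (10:Int) ≤ v),
        bLoop, if_pos hv, hs, hc]
      exact ih (sqDigitsGo v 0) hs0 hsB (by omega)
    · -- B's loop stops; A's keeps its answer from the table fuel
      have ht := table_spec v h0 (by omega)
      rw [bLoop, if_neg hv]
      rw [show f + 1 + 50 = 50 + (f + 1) by omega, aIntLoop_stable 50 (f + 1) v ht.1]
      refine ⟨ht.2, ht.1, ?_⟩
      rw [ht.2, tbl]
      have hk : v = ((v.toNat : Nat) : Int) := by omega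
      rw [hk]
      exact table_nonneg v.toNat (by omega)

-- lockstep: A's string loop mirrors the fuel-structural integer loop
theorem loop_lockstep (f : Nat) : ∀ (v : Int), 0 ≤ v → v < 10 ^ 100 →
    hereuxLoop f (PySem.Int.toStr v) = PySem.Int.toStr (aIntLoop f v)
      ∧ 0 ≤ aIntLoop f v := by
  induction f with
  | zero => intro v hv _; exact ⟨rfl, hv⟩
  | succ f ih =>
    intro v hv hB
    rw [hereuxLoop, aIntLoop]
    by_cases h : 10 ≤ v
    · rw [if_pos ((len_toStr_ne_one v hv).mpr h), if_pos h, hereuxStep_eq v hv,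
        ← sqDigitsF_eq 100 v 0 hv hB]
      have hS : sqDigitsF 100 v 0 = S v.toNat := by
        rw [sqDigitsF_eq 100 v 0 hv hB]; exact sqDigitsGo_nat v hv
      have hnn : 0 ≤ sqDigitsF 100 v 0 := by rw [hS]; exact S_nonneg _
      have hlt : sqDigitsF 100 v 0 < 10 ^ 100 := by
        rw [hS]
        have hb : S v.toNat ≤ 81 * 100 := S_bound 100 v.toNat (by omega)
        calc S v.toNat ≤ 81 * 100 := hb
        _ < 10 ^ 100 := by norm_num
      exact ih _ hnn hlt
    · rw [if_neg (by rw [len_toStr_ne_one v hv]; exact h), if_neg h]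
      exact ⟨rfl, hv⟩

-- ===== VERDICT (by name: the statement is the Claim_ definition above) =====
theorem hereux_spec : Claim_equal_hereux := by
  intro n hdom
  unfold Dom_hereux pvDomInt at hdom
  have hn : -2147483648 ≤ n ∧ n ≤ 2147483648 := by
    simpa using hdom
  unfold Spec_hereux hereux hereux_alt power2
  set v : Int := n * n with hvdef
  have hv0 : 0 ≤ v := mul_self_nonneg n
  have hvB : v ≤ 4611686018427387904 := by nlinarith [hn.1, hn.2]
  have hv100 : v < 10 ^ 100 := by
    calc v ≤ 4611686018427387904 := hvB
    _ < 10 ^ 100 := by norm_num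
  have hpow : n ^ 2 = v := by rw [hvdef]; ring
  obtain ⟨hls, hnn⟩ := loop_lockstep 2000 v hv0 hv100
  rw [hls, hpow, toStr_beq_one _ hnn]
  by_cases hbig : v < 2050
  · obtain ⟨heq, _, _⟩ := main_lemma 1950 v hv0 hv100 (by omega)
    rw [heq]
    rfl
  · -- one explicit step, then the main lemma on the small value
    have hs : sqDigitsF 100 v 0 = sqDigitsGo v 0 := sqDigitsF_eq 100 v 0 hv0 hv100
    have hc : sqChunksF 50 v 0 = sqDigitsGo v 0 :=
      sqChunksF_eq 50 v 0 hv0 (by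
        have h100 : (100 : Int) ^ 50 = 10 ^ 100 := by norm_num
        rw [h100]; exact hv100)
    have hSn : sqDigitsGo v 0 = S v.toNat := sqDigitsGo_nat v hv0
    have hs0 : 0 ≤ sqDigitsGo v 0 := by rw [hSn]; exact S_nonneg _
    have hsmall : sqDigitsGo v 0 ≤ 81 * 19 := by
      rw [hSn]
      exact S_bound 19 v.toNat (by omega)
    rw [show (2000 : Nat) = 1999 + 1 from rfl, aIntLoop, if_pos (by omega : (10:Int) ≤ v),
      show (1950 : Nat) = 1949 + 1 from rfl, bLoop, if_pos (by omega : (100:Int) ≤ v),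
      hs, hc]
    obtain ⟨heq, _, _⟩ := main_lemma 1949 (sqDigitsGo v 0) hs0
      (by
        calc sqDigitsGo v 0 ≤ 81 * 19 := hsmall
        _ < 10 ^ 100 := by norm_num)
      (by omega)
    rw [show (1949 : Nat) + 50 = 1999 from rfl] at heq
    rw [heq]
    rfl
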